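-- pv_equiv track=rewrite | github.com/posl/comment_recommendation | script/mod_gen/3_time/zh/222_D/8.py | solve
-- ===== SOURCE A (Python) =====
-- def solve(N, A, B):
--     MOD = 998244353
--     dp = [[0 for _ in range(3001)] for _ in range(3001)]
--     dp[0][0] = 1
--     for i in range(1, N+1):
--         for j in range(A[i-1], B[i-1]+1):
--             dp[i][j] = sum(dp[i-1][:j+1]) % MOD
--     return sum(dp[N]) % MOD
-- ===== SOURCE B (Python) =====
-- def solve(N, A, B):
--     MOD = 998244353
--     row = [1] + [0] * 3000
--     for i in range(N):
--         lo, hi = A[i], B[i]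
--         if lo > hi:
--             row = [0] * 3001
--         else:
--             s = sum(row[:lo])
--             window = []
--             for x in row[lo:hi + 1]:
--                 s += x
--                 window.append(s % MOD)
--             row = [0] * lo + window + [0] * (3000 - hi)
--     return sum(row) % MOD
-- ===== Notes on version B (the rewrite author's own statement) =====
-- stated objective: faster
-- what changed: B drops A's 3001x3001 table and per-cell re-summation of a growing slice: it keeps only the current row and builds each next row as zero padding around a running prefix sum carried once across the window row[A[i]:B[i]+1].
-- outside the precondition, e.g. on solve(-1, [], []): A returns 0, B returns 1; on solve(1, [-2], [-1]): A returns 1, B returns 0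
import Mathlib
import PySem

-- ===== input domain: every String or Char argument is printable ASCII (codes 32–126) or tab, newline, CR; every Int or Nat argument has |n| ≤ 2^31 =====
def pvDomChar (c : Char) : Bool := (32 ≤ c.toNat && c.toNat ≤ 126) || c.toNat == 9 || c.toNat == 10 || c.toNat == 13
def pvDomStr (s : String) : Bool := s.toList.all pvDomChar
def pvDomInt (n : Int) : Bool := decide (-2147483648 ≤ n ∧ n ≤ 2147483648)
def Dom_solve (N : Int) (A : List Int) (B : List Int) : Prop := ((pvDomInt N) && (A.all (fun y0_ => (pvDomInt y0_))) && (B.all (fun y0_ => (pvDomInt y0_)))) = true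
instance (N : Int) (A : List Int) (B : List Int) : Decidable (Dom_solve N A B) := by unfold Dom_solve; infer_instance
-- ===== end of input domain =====

-- B drops A's 3001x3001 table and per-cell slice re-summation, keeping one current
-- row and filling the next row in a single pass with a running prefix sum (faster).

-- ===== PORT A =====
-- loop body 'dp[i][j] = sum(dp[i-1][:j+1]) % MOD'
def solveInner (dp : List (List Int)) (i j : Int) : List (List Int) :=
  PySem.List.pySetD dp i
    (PySem.List.pySetD (PySem.List.pyGetD dp i []) j
      (PySem.Int.mod (PySem.List.slice (PySem.List.pyGetD dp (i - 1) []) none (some (j + 1))).sum 998244353))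

-- the inner 'for j in range(A[i-1], B[i-1]+1)' loop
def solveOuter (A B : List Int) (dp : List (List Int)) (i : Int) : List (List Int) :=
  (PySem.List.pyRange (PySem.List.pyGetD A (i - 1) 0) (PySem.List.pyGetD B (i - 1) 0 + 1) 1).foldl
    (fun dp j => solveInner dp i j) dp

def solve (N : Int) (A : List Int) (B : List Int) : Int :=
  let dp : List (List Int) :=
    (PySem.List.pyRange 0 3001 1).map (fun _ => (PySem.List.pyRange 0 3001 1).map (fun _ => (0 : Int)))
  let dp := PySem.List.pySetD dp 0 (PySem.List.pySetD (PySem.List.pyGetD dp 0 []) 0 1)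
  let dp := (PySem.List.pyRange 1 (N + 1) 1).foldl (solveOuter A B) dp
  PySem.Int.mod (PySem.List.pyGetD dp N []).sum 998244353

-- ===== PORT B =====
-- one new row per step: zeros outside [lo,hi]; inside, a running prefix sum s of
-- the previous row, extended only over the window row[lo:hi+1]
def solveAltRow (lo hi : Int) (row : List Int) : List Int :=
  if lo > hi then PySem.List.pyRepeat [0] 3001
  else
    let s := (PySem.List.slice row none (some lo)).sum
    let w := (PySem.List.slice row (some lo) (some (hi + 1))).foldl
      (fun (st : List Int × Int) x =>
        let s := st.2 + x
        (st.1 ++ [PySem.Int.mod s 998244353], s)) ([], s)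
    PySem.List.pyRepeat [0] lo ++ w.1 ++ PySem.List.pyRepeat [0] (3000 - hi)

def solve_alt (N : Int) (A : List Int) (B : List Int) : Int :=
  let row := (PySem.List.pyRange 0 N 1).foldl
    (fun row i => solveAltRow (PySem.List.pyGetD A i 0) (PySem.List.pyGetD B i 0) row)
    ([1] ++ PySem.List.pyRepeat [0] 3000)
  PySem.Int.mod row.sum 998244353

-- ===== PRECONDITION & SPEC =====
-- Pre_ keeps the natural domain: 0 ≤ N ≤ 3000 rows present in A and B, and every
-- nonempty range [A[k],B[k]] inside the table 0..3000. Outside it A either raises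
-- IndexError, or (negative N, or a negative lower bound A[k] ≤ B[k]) returns a value
-- produced by Python negative-index wraparound into the table — an artefact outside
-- the natural domain of the count, which B does not reproduce.
def Pre_solve (N : Int) (A : List Int) (B : List Int) : Prop :=
  0 ≤ N ∧ N ≤ 3000 ∧ N ≤ (A.length : Int) ∧ N ≤ (B.length : Int) ∧
  ∀ k : Nat, k < N.toNat → (A.getD k 0 ≤ B.getD k 0 → 0 ≤ A.getD k 0 ∧ B.getD k 0 ≤ 3000)
instance (N : Int) (A : List Int) (B : List Int) : Decidable (Pre_solve N A B) := by
  unfold Pre_solve; infer_instance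

def pvWitness_solve : Int × List Int × List Int := (2, [0, 1], [2, 3])

def Spec_solve (N : Int) (A : List Int) (B : List Int) (out : Int) : Prop := out = solve_alt N A B
instance (N : Int) (A : List Int) (B : List Int) (out : Int) : Decidable (Spec_solve N A B out) := by
  unfold Spec_solve; infer_instance

-- ===== CLAIM (what is proved, stated in full; the proofs are below) =====
def Claim_equal_solve : Prop := ∀ (N : Int) (A : List Int) (B : List Int), Dom_solve N A B → Pre_solve N A B → Spec_solve N A B (solve N A B)

-- ===== LEMMAS AND PROOFS =====

-- the all-zero dp row
def zeroRow : List Int := List.replicate 3001 0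

-- the row both programs compute from the previous row 'prev' and bounds lo..hi
def specRow (lo hi : Int) (prev : List Int) : List Int :=
  (List.range 3001).map (fun j : Nat =>
    if lo ≤ (j : Int) ∧ (j : Int) ≤ hi then PySem.Int.mod ((prev.take (j + 1)).sum) 998244353 else 0)

-- the sequence of dp rows
def rows (A B : List Int) : Nat → List Int
  | 0 => 1 :: List.replicate 3000 0
  | k + 1 => specRow (A.getD k 0) (B.getD k 0) (rows A B k)

-- A's whole table after processing the first t rows
def dps (A B : List Int) : Nat → List (List Int)
  | 0 => (List.replicate 3001 zeroRow).set 0 (rows A B 0)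
  | t + 1 => (dps A B t).set (t + 1) (rows A B (t + 1))

-- the value A stores at column j (j ≥ 0)
def gfun (prev : List Int) (j : Int) : Int :=
  PySem.Int.mod ((prev.take (j + 1).toNat).sum) 998244353

lemma set_map_range (n k : Nat) (f : Nat → Int) (v : Int) :
    ((List.range n).map f).set k v = (List.range n).map (fun j => if j = k then v else f j) := by
  apply List.ext_getElem (by simp)
  intro i h1 h2
  simp only [List.getElem_set, List.getElem_map, List.getElem_range]
  by_cases h : k = i
  · simp [h]
  · simp only [if_neg h]
    rw [if_neg (fun hh : i = k => h hh.symm)]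

lemma zeroRow_eq_map (n : Nat) : (List.range n).map (fun _ => (0 : Int)) = List.replicate n 0 := by
  simp [List.map_const']

lemma win_loop (ws : List Int) (s0 : Int) (acc : List Int) :
    ws.foldl (fun (st : List Int × Int) x =>
        let s := st.2 + x
        (st.1 ++ [PySem.Int.mod s 998244353], s)) (acc, s0)
      = (acc ++ (List.range ws.length).map
            (fun k => PySem.Int.mod (s0 + (ws.take (k + 1)).sum) 998244353),
         s0 + ws.sum) := by
  induction ws generalizing acc s0 with
  | nil => simp
  | cons x ws ih =>
    simp only [List.foldl_cons, ih, List.length_cons, List.range_succ_eq_map, List.map_cons,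
      List.map_map]
    refine Prod.ext ?_ ?_
    · show acc ++ [PySem.Int.mod (s0 + x) 998244353] ++ _ = _
      rw [List.append_assoc, List.singleton_append]
      congr 1
      congr 1
      · show PySem.Int.mod (s0 + x) 998244353
          = PySem.Int.mod (s0 + (List.take (0 + 1) (x :: ws)).sum) 998244353
        norm_num
      · apply List.map_congr_left
        intro k hk
        show PySem.Int.mod (s0 + x + (List.take (k + 1) ws).sum) 998244353
          = PySem.Int.mod (s0 + (List.take (k + 1 + 1) (x :: ws)).sum) 998244353
        rw [show k + 1 + 1 = (k + 1) + 1 from rfl, List.take_succ_cons, List.sum_cons]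
        ring_nf
    · show s0 + x + ws.sum = s0 + (x :: ws).sum
      rw [List.sum_cons]
      ring

set_option maxRecDepth 8192 in
lemma solveAltRow_eq (lo hi : Int) (row : List Int) (hlen : row.length = 3001)
    (hc : lo ≤ hi → 0 ≤ lo ∧ hi ≤ 3000) :
    solveAltRow lo hi row = specRow lo hi row := by
  rw [solveAltRow]
  by_cases hab : lo > hi
  · rw [if_pos hab, PySem.List.pyRepeat_singleton, specRow, ← zeroRow_eq_map]
    apply (List.map_congr_left _).symm
    intro j hj
    rw [if_neg (by omega)]
  · obtain ⟨h0, h3000⟩ := hc (by omega)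
    rw [if_neg hab]
    simp only [win_loop, List.nil_append]
    rw [PySem.List.slice_to _ h0, PySem.List.slice_toNat _ h0 (by omega)]
    set L := lo.toNat with hL
    have hW : ((hi + 1).toNat - L : Nat) = hi.toNat + 1 - L := by omega
    have hwlen : ((row.drop L).take ((hi + 1).toNat - L)).length = (hi + 1).toNat - L := by
      rw [List.length_take, List.length_drop, hlen]
      omega
    apply List.ext_getElem
    · simp only [List.length_append, List.length_map, List.length_range, hwlen,
        PySem.List.pyRepeat_singleton, List.length_replicate, specRow]
      omega
    · intro i h1 h2
      have hi3001 : i < 3001 := by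
        rw [specRow, List.length_map, List.length_range] at h2
        exact h2
      simp only [specRow, List.getElem_map, List.getElem_range]
      simp only [PySem.List.pyRepeat_singleton]
      simp only [List.getElem_append, List.length_append, List.length_replicate, List.length_map,
        List.length_range, List.getElem_replicate, List.getElem_map, List.getElem_range, hwlen]
      rw [List.take_take] at *
      split_ifs with w1 w2 w3 <;>
        first
          | rfl
          | omega
          | (rw [min_eq_left (by omega)]
             congr 1
             conv_rhs => rw [show i + 1 = L + (i - L + 1) by omega, List.take_add,
               List.sum_append])

lemma solveInner_eq (dp : List (List Int)) (k : Nat) (j : Int) (hk : 1 ≤ k) (hj : 0 ≤ j) :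
    solveInner dp (k : Int) j
      = dp.set k ((dp.getD k []).set j.toNat (gfun (dp.getD (k - 1) []) j)) := by
  unfold solveInner gfun
  rw [show (k : Int) - 1 = ((k - 1 : Nat) : Int) by omega]
  rw [PySem.List.pySetD_natCast, PySem.List.pyGetD_natCast, PySem.List.pyGetD_natCast,
      PySem.List.pySetD_of_nonneg _ _ hj, PySem.List.slice_to _ (by omega)]

lemma inner_fold (prev : List Int) (js : List Int) (dp : List (List Int)) (k : Nat)
    (hk : 1 ≤ k) (hklen : k < dp.length) (hprev : dp.getD (k - 1) [] = prev)
    (hjs : ∀ j ∈ js, 0 ≤ j) :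
    js.foldl (fun dp j => solveInner dp (k : Int) j) dp
      = dp.set k (js.foldl (fun r j => r.set j.toNat (gfun prev j)) (dp.getD k [])) := by
  induction js generalizing dp with
  | nil =>
    simp only [List.foldl_nil]
    rw [List.getD_eq_getElem?_getD, List.getElem?_eq_getElem hklen]
    simp [List.set_getElem_self hklen]
  | cons j js ih =>
    simp only [List.foldl_cons]
    rw [solveInner_eq dp k j hk (hjs j (by simp)), hprev]
    rw [ih (dp.set k ((dp.getD k []).set j.toNat (gfun prev j)))
        (by simpa using hklen)
        (by rw [List.getD_eq_getElem?_getD, List.getElem?_set_ne (by omega),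
                ← List.getD_eq_getElem?_getD, hprev])
        (fun j hj => hjs j (by simp [hj]))]
    rw [List.set_set]
    congr 1
    rw [List.getD_eq_getElem?_getD, List.getElem?_set_self hklen]
    rfl

lemma build_row_aux (prev : List Int) (a : Int) (ha : 0 ≤ a) (t : Nat) (hub : a + t ≤ 3001) :
    (PySem.List.pyRange a (a + t) 1).foldl (fun r j => r.set j.toNat (gfun prev j)) zeroRow
      = (List.range 3001).map (fun j : Nat =>
          if a ≤ (j : Int) ∧ (j : Int) < a + t then gfun prev (j : Int) else 0) := by
  induction t with
  | zero =>
    rw [show a + ((0 : Nat) : Int) = a by simp, PySem.List.pyRange_one_eq_nil le_rfl]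
    simp only [List.foldl_nil]
    rw [zeroRow, ← zeroRow_eq_map 3001]
    apply (List.map_congr_left _).symm
    intro j hj
    rw [if_neg (by omega)]
  | succ t ih =>
    rw [show a + ((t + 1 : Nat) : Int) = (a + t) + 1 by push_cast; ring,
        PySem.List.pyRange_one_succ_right (by omega), List.foldl_append]
    rw [ih (by omega)]
    simp only [List.foldl_cons, List.foldl_nil]
    rw [set_map_range 3001 (a + (t : Int)).toNat]
    apply List.map_congr_left
    intro j hj
    simp only [List.mem_range] at hj
    by_cases h : (j : Int) = a + t
    · rw [if_pos (by omega), if_pos (by omega), h]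
    · rw [if_neg (by omega)]
      by_cases h2 : a ≤ (j : Int) ∧ (j : Int) < a + t
      · rw [if_pos h2, if_pos (by omega)]
      · rw [if_neg h2, if_neg (by omega)]

lemma build_row (prev : List Int) (a b : Int) (h : a ≤ b → 0 ≤ a ∧ b ≤ 3000) :
    (PySem.List.pyRange a (b + 1) 1).foldl (fun r j => r.set j.toNat (gfun prev j)) zeroRow
      = specRow a b prev := by
  by_cases hab : a ≤ b
  · obtain ⟨ha, hb⟩ := h hab
    have hx := build_row_aux prev a ha (b + 1 - a).toNat (by omega)
    rw [show a + ((b + 1 - a).toNat : Int) = b + 1 by omega] at hx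
    rw [hx, specRow]
    apply List.map_congr_left
    intro j hj
    simp only [List.mem_range] at hj
    by_cases h2 : a ≤ (j : Int) ∧ (j : Int) ≤ b
    · rw [if_pos (by omega), if_pos h2, gfun, show ((j : Int) + 1).toNat = j + 1 by omega]
    · rw [if_neg (by omega), if_neg h2]
  · rw [PySem.List.pyRange_one_eq_nil (by omega), List.foldl_nil, specRow, zeroRow,
        ← zeroRow_eq_map 3001]
    apply (List.map_congr_left _).symm
    intro j hj
    rw [if_neg (by omega)]

lemma dps_length (A B : List Int) (t : Nat) : (dps A B t).length = 3001 := by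
  induction t with
  | zero =>
    show ((List.replicate 3001 zeroRow).set 0 (rows A B 0)).length = 3001
    rw [List.length_set, List.length_replicate]
  | succ t ih =>
    show ((dps A B t).set (t + 1) (rows A B (t + 1))).length = 3001
    rw [List.length_set, ih]

lemma dps_getD (A B : List Int) (t m : Nat) (hm : m ≤ 3000) :
    (dps A B t).getD m [] = if m ≤ t then rows A B m else zeroRow := by
  induction t with
  | zero =>
    rw [show dps A B 0 = (List.replicate 3001 zeroRow).set 0 (rows A B 0) from rfl,
        List.getD_eq_getElem?_getD]
    by_cases h : m = 0
    · subst h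
      rw [List.getElem?_set_self (by rw [List.length_replicate]; omega)]
      split_ifs with hx
      · exact Option.getD_some
      · omega
    · rw [List.getElem?_set_ne (by omega), List.getElem?_replicate,
          if_pos (show m < 3001 by omega), if_neg (show ¬ m ≤ 0 by omega)]
      rfl
  | succ t ih =>
    rw [show dps A B (t + 1) = (dps A B t).set (t + 1) (rows A B (t + 1)) from rfl,
        List.getD_eq_getElem?_getD]
    by_cases h : m = t + 1
    · subst h
      rw [List.getElem?_set_self (show t + 1 < ((dps A B t).length) by rw [dps_length]; omega)]
      split_ifs with hx
      · exact Option.getD_some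
      · omega
    · rw [List.getElem?_set_ne (by omega), ← List.getD_eq_getElem?_getD, ih]
      by_cases h2 : m ≤ t
      · rw [if_pos h2, if_pos (by omega)]
      · rw [if_neg h2, if_neg (by omega)]

lemma solveOuter_dps (A B : List Int) (t : Nat) (ht : t + 1 ≤ 3000)
    (hcond : A.getD t 0 ≤ B.getD t 0 → 0 ≤ A.getD t 0 ∧ B.getD t 0 ≤ 3000) :
    solveOuter A B (dps A B t) ((t : Int) + 1) = dps A B (t + 1) := by
  rw [solveOuter, show (t : Int) + 1 - 1 = ((t : Nat) : Int) by ring,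
      PySem.List.pyGetD_natCast, PySem.List.pyGetD_natCast,
      show (t : Int) + 1 = ((t + 1 : Nat) : Int) by push_cast; ring]
  rw [inner_fold (rows A B t) _ _ (t + 1) (by omega) (by rw [dps_length]; omega)
      (by simpa using dps_getD A B t t (by omega))
      (by intro j hj
          rw [PySem.List.mem_pyRange_one] at hj
          have := hcond (by omega)
          omega)]
  rw [show (dps A B t).getD (t + 1) [] = zeroRow by
        rw [dps_getD A B t (t + 1) (by omega)]; rw [if_neg (by omega)]]
  rw [build_row _ _ _ hcond]
  rfl

lemma outer_fold (A B : List Int) (t : Nat) (ht : t ≤ 3000)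
    (hcond : ∀ k : Nat, k < t → (A.getD k 0 ≤ B.getD k 0 → 0 ≤ A.getD k 0 ∧ B.getD k 0 ≤ 3000)) :
    (PySem.List.pyRange 1 ((t : Int) + 1) 1).foldl (solveOuter A B) (dps A B 0) = dps A B t := by
  induction t with
  | zero => rw [show ((0 : Nat) : Int) + 1 = 1 by simp, PySem.List.pyRange_one_eq_nil le_rfl,
                List.foldl_nil]
  | succ t ih =>
    rw [show ((t + 1 : Nat) : Int) + 1 = ((t : Int) + 1) + 1 by push_cast; ring,
        PySem.List.pyRange_one_succ_right (by omega), List.foldl_append,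
        ih (by omega) (fun k hk => hcond k (by omega)), List.foldl_cons, List.foldl_nil,
        solveOuter_dps A B t (by omega) (hcond t (by omega))]

lemma rows_length (A B : List Int) (k : Nat) : (rows A B k).length = 3001 := by
  cases k with
  | zero =>
    show (1 :: List.replicate 3000 0).length = 3001
    rw [List.length_cons, List.length_replicate]
  | succ k =>
    show (specRow (A.getD k 0) (B.getD k 0) (rows A B k)).length = 3001
    rw [specRow, List.length_map, List.length_range]

lemma alt_fold (A B : List Int) (t : Nat)
    (hcond : ∀ k : Nat, k < t → (A.getD k 0 ≤ B.getD k 0 → 0 ≤ A.getD k 0 ∧ B.getD k 0 ≤ 3000)) :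
    (PySem.List.pyRange 0 (t : Int) 1).foldl
      (fun row i => solveAltRow (PySem.List.pyGetD A i 0) (PySem.List.pyGetD B i 0) row)
      ([1] ++ PySem.List.pyRepeat [0] 3000) = rows A B t := by
  induction t with
  | zero =>
    rw [show ((0 : Nat) : Int) = 0 from rfl, PySem.List.pyRange_one_eq_nil le_rfl, List.foldl_nil,
        PySem.List.pyRepeat_singleton]
    rfl
  | succ t ih =>
    rw [show ((t + 1 : Nat) : Int) = (t : Int) + 1 by push_cast; ring,
        PySem.List.pyRange_one_succ_right (by positivity), List.foldl_append,
        ih (fun k hk => hcond k (by omega)),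
        List.foldl_cons, List.foldl_nil, PySem.List.pyGetD_natCast, PySem.List.pyGetD_natCast,
        solveAltRow_eq _ _ _ (rows_length A B t) (hcond t (by omega))]
    rfl

lemma dp1_eq (A B : List Int) :
    PySem.List.pySetD
      ((PySem.List.pyRange 0 3001 1).map (fun _ => (PySem.List.pyRange 0 3001 1).map (fun _ => (0 : Int))))
      0
      (PySem.List.pySetD
        (PySem.List.pyGetD
          ((PySem.List.pyRange 0 3001 1).map (fun _ => (PySem.List.pyRange 0 3001 1).map (fun _ => (0 : Int))))
          0 []) 0 1)
      = dps A B 0 := by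
  have hz : (PySem.List.pyRange 0 3001 1).map (fun _ => (0 : Int)) = zeroRow := by
    rw [List.map_const', PySem.List.length_pyRange_one, zeroRow]
    rfl
  have hdp : (PySem.List.pyRange 0 3001 1).map
      (fun _ => (PySem.List.pyRange 0 3001 1).map (fun _ => (0 : Int)))
      = List.replicate 3001 zeroRow := by
    rw [List.map_const' (b := (PySem.List.pyRange 0 3001 1).map (fun _ => (0 : Int))), hz,
        PySem.List.length_pyRange_one]
    rfl
  rw [hdp, PySem.List.pyGetD_zero, PySem.List.pySetD_of_nonneg _ _ le_rfl,
      PySem.List.pySetD_of_nonneg _ _ le_rfl]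
  rw [show List.getD (List.replicate 3001 zeroRow) 0 [] = zeroRow from rfl]
  rw [show (0 : Int).toNat = 0 from rfl]
  rw [show zeroRow.set 0 1 = rows A B 0 by
        rw [zeroRow, show (3001 : Nat) = 3000 + 1 from rfl, List.replicate_succ, List.set_cons_zero]
        rfl]
  rfl

-- ===== VERDICT (by name: the statement is the Claim_ definition above) =====
theorem solve_spec : Claim_equal_solve := by
  intro N A B _hdom hpre
  obtain ⟨h0, h3000, _hA, _hB, hcond⟩ := hpre
  show solve N A B = solve_alt N A B
  have hN : N = (N.toNat : Int) := by omega
  simp only [solve, solve_alt]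
  rw [dp1_eq A B, hN, outer_fold A B N.toNat (by omega) hcond,
      PySem.List.pyGetD_natCast, dps_getD A B N.toNat N.toNat (by omega), if_pos (Nat.le_refl _),
      alt_fold A B N.toNat hcond]
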